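-- pv_equiv track=rewrite | github.com/iocanel/advent-of-code | 2023/day01/b.py | as_number
-- ===== SOURCE A (Python) =====
-- def as_number(str):
--     numbers = {
--         "one": 1,
--         "two": 2,
--         "three": 3,
--         "four": 4,
--         "five": 5,
--         "six": 6,
--         "seven": 7,
--         "eight": 8,
--         "nine": 9,
--         "0": 0
--     }
--     for word, num in numbers.items():
--         if str.lower().endswith(word):
--             return num
--     return -1
-- ===== SOURCE B (Python) =====
-- def as_number(str):
--     # Walk a hand-compiled decision tree over the reversed, lowercased string:
--     # each number word is recognised one character at a time from the end,
--     # sharing common suffixes ("one"/"nine", etc.) instead of testing ten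
--     # endswith candidates.
--     r = str.lower()[::-1]
--
--     def at(i, ch):
--         return i < len(r) and r[i] == ch
--
--     if at(0, 'e'):
--         if at(1, 'n'):
--             if at(2, 'o'):
--                 return 1
--             if at(2, 'i') and at(3, 'n'):
--                 return 9
--         elif at(1, 'e'):
--             if at(2, 'r') and at(3, 'h') and at(4, 't'):
--                 return 3
--         elif at(1, 'v'):
--             if at(2, 'i') and at(3, 'f'):
--                 return 5
--     elif at(0, 'o'):
--         if at(1, 'w') and at(2, 't'):
--             return 2
--     elif at(0, 'r'):
--         if at(1, 'u') and at(2, 'o') and at(3, 'f'):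
--             return 4
--     elif at(0, 'x'):
--         if at(1, 'i') and at(2, 's'):
--             return 6
--     elif at(0, 'n'):
--         if at(1, 'e') and at(2, 'v') and at(3, 'e') and at(4, 's'):
--             return 7
--     elif at(0, 't'):
--         if at(1, 'h') and at(2, 'g') and at(3, 'i') and at(4, 'e'):
--             return 8
--     elif at(0, '0'):
--         return 0
--     return -1
-- ===== Notes on version B (the rewrite author's own statement) =====
-- stated objective: alternative
-- what changed: B replaces A's loop over ten dict entries with endswith (re-lowercasing the string on every iteration) by reversing the lowered string once and walking a hand-compiled character decision tree that shares common word suffixes, so each character of the tail is inspected at most once per branch.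
import Mathlib
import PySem

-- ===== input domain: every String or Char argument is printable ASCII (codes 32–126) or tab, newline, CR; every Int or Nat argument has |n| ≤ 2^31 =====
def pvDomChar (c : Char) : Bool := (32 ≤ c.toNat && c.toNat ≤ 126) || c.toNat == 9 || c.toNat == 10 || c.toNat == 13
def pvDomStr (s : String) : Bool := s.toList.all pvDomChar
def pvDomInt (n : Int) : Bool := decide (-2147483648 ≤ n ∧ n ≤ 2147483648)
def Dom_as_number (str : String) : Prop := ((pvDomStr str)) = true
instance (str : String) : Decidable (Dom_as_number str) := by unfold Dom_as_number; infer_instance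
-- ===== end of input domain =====

-- B replaces A's ten-entry dict endswith scan by one reverse of the lowered string plus a hand-compiled character decision tree: alternative decomposition, same cost.


-- ===== PORT A =====
-- the dict literal 'numbers' (insertion order)
def pvNumbersA : PySem.Dict String Int :=
  ⟨[("one", 1), ("two", 2), ("three", 3), ("four", 4), ("five", 5),
    ("six", 6), ("seven", 7), ("eight", 8), ("nine", 9), ("0", 0)]⟩

-- 'for word, num in numbers.items(): if str.lower().endswith(word): return num'
def pvGoA (str : String) : List (String × Int) → Int
  | [] => -1
  | (word, num) :: rest =>
      if PySem.Str.endswith (PySem.Str.lower str) word then num else pvGoA str rest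

def as_number (str : String) : Int := pvGoA str pvNumbersA.items

-- ===== PORT B =====
-- 'at(i, ch) = i < len(r) and r[i] == ch' — i is a nonnegative literal, so the
-- guarded r[i] is plain indexing; r[i]? = none exactly when Python would raise,
-- and the guard makes that case unreachable: exact.
def pvAt (r : List Char) (i : Nat) (c : Char) : Bool :=
  decide (i < r.length) && (r[i]? == some c)

-- the nested if/elif decision tree of Source B, verbatim
def pvTree (r : List Char) : Int :=
  if pvAt r 0 'e' then
    if pvAt r 1 'n' then
      if pvAt r 2 'o' then 1
      else if pvAt r 2 'i' && pvAt r 3 'n' then 9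
      else -1
    else if pvAt r 1 'e' then
      (if pvAt r 2 'r' && pvAt r 3 'h' && pvAt r 4 't' then 3 else -1)
    else if pvAt r 1 'v' then
      (if pvAt r 2 'i' && pvAt r 3 'f' then 5 else -1)
    else -1
  else if pvAt r 0 'o' then
    (if pvAt r 1 'w' && pvAt r 2 't' then 2 else -1)
  else if pvAt r 0 'r' then
    (if pvAt r 1 'u' && pvAt r 2 'o' && pvAt r 3 'f' then 4 else -1)
  else if pvAt r 0 'x' then
    (if pvAt r 1 'i' && pvAt r 2 's' then 6 else -1)
  else if pvAt r 0 'n' then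
    (if pvAt r 1 'e' && pvAt r 2 'v' && pvAt r 3 'e' && pvAt r 4 's' then 7 else -1)
  else if pvAt r 0 't' then
    (if pvAt r 1 'h' && pvAt r 2 'g' && pvAt r 3 'i' && pvAt r 4 'e' then 8 else -1)
  else if pvAt r 0 '0' then 0
  else -1

-- 'r = str.lower()[::-1]' — s[::-1] is the reverse (PySem.Str.slice?_none_none_neg_one): exact
def as_number_alt (str : String) : Int :=
  pvTree ((PySem.Str.lower str).toList.reverse)

-- ===== PRECONDITION & SPEC =====
def Spec_as_number (str : String) (out : Int) : Prop := out = as_number_alt str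
instance (str : String) (out : Int) : Decidable (Spec_as_number str out) := by unfold Spec_as_number; infer_instance

-- ===== CLAIM (what is proved, stated in full; the proofs are below) =====
def Claim_equal_as_number : Prop := ∀ (str : String), Dom_as_number str → Spec_as_number str (as_number str)

-- ===== LEMMAS AND PROOFS =====

lemma pvEndswith_eq (s w : List Char) :
    PySem.Chars.endswith s w = decide (List.drop (s.length - w.length) s = w) := by
  apply Bool.eq_iff_iff.mpr
  simp only [PySem.Chars.endswith, List.isSuffixOf_iff_suffix, decide_eq_true_eq]
  rw [List.suffix_iff_eq_drop, eq_comm]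

-- the endswith test as a tail equation, in iff form for rewriting if-conditions
lemma pvEndswith_iff (s w : List Char) :
    (PySem.Chars.endswith s w = true) ↔ (List.drop (s.length - w.length) s = w) := by
  rw [pvEndswith_eq]; exact decide_eq_true_iff

-- A's chain as one expression over the lowered characters
def pvCA (s : String) : Int :=
  if s.toList.drop (s.toList.length - 3) = ['o','n','e'] then 1
  else if s.toList.drop (s.toList.length - 3) = ['t','w','o'] then 2
  else if s.toList.drop (s.toList.length - 5) = ['t','h','r','e','e'] then 3
  else if s.toList.drop (s.toList.length - 4) = ['f','o','u','r'] then 4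
  else if s.toList.drop (s.toList.length - 4) = ['f','i','v','e'] then 5
  else if s.toList.drop (s.toList.length - 3) = ['s','i','x'] then 6
  else if s.toList.drop (s.toList.length - 5) = ['s','e','v','e','n'] then 7
  else if s.toList.drop (s.toList.length - 5) = ['e','i','g','h','t'] then 8
  else if s.toList.drop (s.toList.length - 4) = ['n','i','n','e'] then 9
  else if s.toList.drop (s.toList.length - 1) = ['0'] then 0
  else -1

lemma pvA_eq_pvCA (str : String) : as_number str = pvCA (PySem.Str.lower str) := by
  simp [as_number, pvNumbersA, pvGoA, PySem.Str.endswith, pvEndswith_iff, pvCA]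

-- a length-k tail of l is a take of l.reverse
lemma pvDrop_iff (l w : List Char) (k : Nat) (hw : w.length = k) :
    (l.drop (l.length - k) = w) ↔ (l.reverse.take k = w.reverse) := by
  constructor
  · intro h
    have := congrArg List.reverse h
    rw [List.reverse_drop] at this
    by_cases hk : k ≤ l.length
    · rwa [show l.length - (l.length - k) = k from by omega] at this
    · exfalso
      have := congrArg List.length h
      simp at this
      omega
  · intro h
    have := congrArg List.reverse h
    rw [List.reverse_take, List.reverse_reverse, List.reverse_reverse,
        List.length_reverse] at this
    by_cases hk : k ≤ l.length
    · exact this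
    · have hlen := congrArg List.length h
      simp at hlen
      omega

-- take-to-pointwise bridges (patterns of length 1, 3, 4, 5)
lemma pvTake1 (r : List Char) (a : Char) :
    (r.take 1 = [a]) ↔ (r[0]? = some a) := by
  rcases r with _ | ⟨x0, t⟩ <;> simp
lemma pvTake3 (r : List Char) (a b c : Char) :
    (r.take 3 = [a,b,c]) ↔ (r[0]? = some a ∧ r[1]? = some b ∧ r[2]? = some c) := by
  rcases r with _ | ⟨x0, _ | ⟨x1, _ | ⟨x2, t⟩⟩⟩ <;> simp
lemma pvTake4 (r : List Char) (a b c d : Char) :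
    (r.take 4 = [a,b,c,d]) ↔ (r[0]? = some a ∧ r[1]? = some b ∧ r[2]? = some c ∧ r[3]? = some d) := by
  rcases r with _ | ⟨x0, _ | ⟨x1, _ | ⟨x2, _ | ⟨x3, t⟩⟩⟩⟩ <;> simp
lemma pvTake5 (r : List Char) (a b c d e : Char) :
    (r.take 5 = [a,b,c,d,e]) ↔ (r[0]? = some a ∧ r[1]? = some b ∧ r[2]? = some c ∧ r[3]? = some d ∧ r[4]? = some e) := by
  rcases r with _ | ⟨x0, _ | ⟨x1, _ | ⟨x2, _ | ⟨x3, _ | ⟨x4, t⟩⟩⟩⟩⟩ <;> simp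

-- the Bool test of Source B's 'at' as the bare pointwise Prop
lemma pvAt_iff (r : List Char) (i : Nat) (c : Char) :
    (pvAt r i c = true) ↔ (r[i]? = some c) := by
  constructor
  · intro h
    simp only [pvAt, Bool.and_eq_true, beq_iff_eq] at h
    exact h.2
  · intro h
    obtain ⟨hlt, heq⟩ := List.getElem?_eq_some_iff.mp h
    simp [pvAt, hlt, heq]

-- A's if-chain, read pointwise on the reversed characters
def pvChain (r : List Char) : Int :=
  if r[0]? = some 'e' ∧ r[1]? = some 'n' ∧ r[2]? = some 'o' then 1
  else if r[0]? = some 'o' ∧ r[1]? = some 'w' ∧ r[2]? = some 't' then 2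
  else if r[0]? = some 'e' ∧ r[1]? = some 'e' ∧ r[2]? = some 'r' ∧ r[3]? = some 'h' ∧ r[4]? = some 't' then 3
  else if r[0]? = some 'r' ∧ r[1]? = some 'u' ∧ r[2]? = some 'o' ∧ r[3]? = some 'f' then 4
  else if r[0]? = some 'e' ∧ r[1]? = some 'v' ∧ r[2]? = some 'i' ∧ r[3]? = some 'f' then 5
  else if r[0]? = some 'x' ∧ r[1]? = some 'i' ∧ r[2]? = some 's' then 6
  else if r[0]? = some 'n' ∧ r[1]? = some 'e' ∧ r[2]? = some 'v' ∧ r[3]? = some 'e' ∧ r[4]? = some 's' then 7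
  else if r[0]? = some 't' ∧ r[1]? = some 'h' ∧ r[2]? = some 'g' ∧ r[3]? = some 'i' ∧ r[4]? = some 'e' then 8
  else if r[0]? = some 'e' ∧ r[1]? = some 'n' ∧ r[2]? = some 'i' ∧ r[3]? = some 'n' then 9
  else if r[0]? = some '0' then 0
  else -1

lemma pvCA_eq_pvChain (s : String) : pvCA s = pvChain s.toList.reverse := by
  simp only [pvCA, pvChain,
    pvDrop_iff s.toList ['o','n','e'] 3 rfl, pvDrop_iff s.toList ['t','w','o'] 3 rfl,
    pvDrop_iff s.toList ['t','h','r','e','e'] 5 rfl, pvDrop_iff s.toList ['f','o','u','r'] 4 rfl,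
    pvDrop_iff s.toList ['f','i','v','e'] 4 rfl, pvDrop_iff s.toList ['s','i','x'] 3 rfl,
    pvDrop_iff s.toList ['s','e','v','e','n'] 5 rfl, pvDrop_iff s.toList ['e','i','g','h','t'] 5 rfl,
    pvDrop_iff s.toList ['n','i','n','e'] 4 rfl, pvDrop_iff s.toList ['0'] 1 rfl,
    List.reverse_cons, List.reverse_nil, List.nil_append, List.cons_append,
    pvTake1, pvTake3, pvTake4, pvTake5]

-- the chain equals Source B's decision tree: case on the tree's branching atoms
lemma pvChain_eq_pvTree (r : List Char) : pvChain r = pvTree r := by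
  by_cases h0 : r[0]? = some 'e'
  · by_cases h1 : r[1]? = some 'n'
    · by_cases h2 : r[2]? = some 'o'
      · simp_all [pvChain, pvTree, pvAt_iff, Bool.and_eq_true, and_assoc]
      · by_cases h9 : r[2]? = some 'i' ∧ r[3]? = some 'n' <;> simp_all [pvChain, pvTree, pvAt_iff, Bool.and_eq_true, and_assoc]
    · by_cases h1e : r[1]? = some 'e'
      · by_cases h3 : r[2]? = some 'r' ∧ r[3]? = some 'h' ∧ r[4]? = some 't' <;> simp_all [pvChain, pvTree, pvAt_iff, Bool.and_eq_true, and_assoc]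
      · by_cases h1v : r[1]? = some 'v'
        · by_cases h5 : r[2]? = some 'i' ∧ r[3]? = some 'f' <;> simp_all [pvChain, pvTree, pvAt_iff, Bool.and_eq_true, and_assoc]
        · simp_all [pvChain, pvTree, pvAt_iff, Bool.and_eq_true, and_assoc]
  · by_cases h0o : r[0]? = some 'o'
    · by_cases h2t : r[1]? = some 'w' ∧ r[2]? = some 't' <;> simp_all [pvChain, pvTree, pvAt_iff, Bool.and_eq_true, and_assoc]
    · by_cases h0r : r[0]? = some 'r'
      · by_cases h4 : r[1]? = some 'u' ∧ r[2]? = some 'o' ∧ r[3]? = some 'f' <;> simp_all [pvChain, pvTree, pvAt_iff, Bool.and_eq_true, and_assoc]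
      · by_cases h0x : r[0]? = some 'x'
        · by_cases h6 : r[1]? = some 'i' ∧ r[2]? = some 's' <;> simp_all [pvChain, pvTree, pvAt_iff, Bool.and_eq_true, and_assoc]
        · by_cases h0n : r[0]? = some 'n'
          · by_cases h7 : r[1]? = some 'e' ∧ r[2]? = some 'v' ∧ r[3]? = some 'e' ∧ r[4]? = some 's' <;> simp_all [pvChain, pvTree, pvAt_iff, Bool.and_eq_true, and_assoc]
          · by_cases h0t : r[0]? = some 't'
            · by_cases h8 : r[1]? = some 'h' ∧ r[2]? = some 'g' ∧ r[3]? = some 'i' ∧ r[4]? = some 'e' <;> simp_all [pvChain, pvTree, pvAt_iff, Bool.and_eq_true, and_assoc]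
            · by_cases h0z : r[0]? = some '0' <;> simp_all [pvChain, pvTree, pvAt_iff, Bool.and_eq_true, and_assoc]

-- ===== VERDICT (by name: the statement is the Claim_ definition above) =====
theorem as_number_spec : Claim_equal_as_number := by
  intro str _
  unfold Spec_as_number as_number_alt
  rw [pvA_eq_pvCA, pvCA_eq_pvChain]
  exact pvChain_eq_pvTree ((PySem.Str.lower str).toList.reverse)
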